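-- pv_equiv track=rewrite | github.com/cchanging/ai-hackthon | wangzhenchen/artifacts/FuzzAsterinas/tools/import_syz.py | extract_crashlog_program
-- ===== SOURCE A (Python) =====
-- def extract_crashlog_program(raw: str) -> str:
--     lines = raw.splitlines()
--     block: list[str] = []
--     in_block = False
--     for line in lines:
--         stripped = line.strip()
--         looks_like_call = "(" in stripped and stripped.endswith(")") and not stripped.startswith("[")
--         looks_like_assignment = stripped.startswith("r") and "=" in stripped and looks_like_call
--         if looks_like_call or looks_like_assignment:
--             in_block = True
--             block.append(stripped)
--             continue
--         if in_block and not stripped: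
--             break
--     return "\n".join(block).strip()
-- ===== SOURCE B (Python) =====
-- def extract_crashlog_program(raw: str) -> str:
--     def is_call(s: str) -> bool:
--         return "(" in s and s.endswith(")") and not s.startswith("[")
--     ss = [line.strip() for line in raw.splitlines()]
--     start = next((i for i, s in enumerate(ss) if is_call(s)), None)
--     if start is None:
--         return ""
--     stop = next((i for i in range(start, len(ss)) if not ss[i]), len(ss))
--     return "\n".join(s for s in ss[start:stop] if is_call(s)).strip()
-- ===== Notes on version B (the rewrite author's own statement) =====
-- stated objective: alternative
-- what changed: Replaced A's flag-driven state machine (in_block boolean, append/break inside one loop) by an index/slice decomposition: build the stripped lines once, locate the first call-looking line and the first empty line after it, then slice that segment and filter it down to the call-looking lines; the redundant assignment branch is dropped since it is subsumed by the call test.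
import Mathlib
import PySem

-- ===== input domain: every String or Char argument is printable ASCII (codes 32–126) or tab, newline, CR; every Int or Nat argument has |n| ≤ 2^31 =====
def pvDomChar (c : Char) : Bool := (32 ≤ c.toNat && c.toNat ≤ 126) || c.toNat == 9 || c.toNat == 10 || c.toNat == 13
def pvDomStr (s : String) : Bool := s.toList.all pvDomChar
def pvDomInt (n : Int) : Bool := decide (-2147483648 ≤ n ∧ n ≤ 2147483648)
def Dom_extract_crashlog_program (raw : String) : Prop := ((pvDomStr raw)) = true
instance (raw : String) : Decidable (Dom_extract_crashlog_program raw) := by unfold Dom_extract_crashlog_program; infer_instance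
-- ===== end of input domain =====

-- B replaces A's flag-driven state machine by an index/slice decomposition (find the first
-- call-looking line, find the first empty line after it, slice and filter); objective:
-- alternative decomposition, same cost.

-- ===== PORT A =====
def pvALoop : List String → List String → Bool → List String
  | [], block, _ => block
  | l :: rest, block, inb =>
    let stripped := PySem.Str.strip l
    let looks_like_call := PySem.Str.isIn "(" stripped && PySem.Str.endswith stripped ")" && !(PySem.Str.startswith stripped "[")
    let looks_like_assignment := PySem.Str.startswith stripped "r" && PySem.Str.isIn "=" stripped && looks_like_call
    if looks_like_call || looks_like_assignment then
      pvALoop rest (block ++ [stripped]) true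
    else if inb && stripped == "" then block
    else pvALoop rest block inb

def extract_crashlog_program (raw : String) : String :=
  PySem.Str.strip (PySem.Str.join "\n" (pvALoop (PySem.Str.splitlines raw) [] false))

-- ===== PORT B =====
def pvIsCall (s : String) : Bool :=
  PySem.Str.isIn "(" s && PySem.Str.endswith s ")" && !(PySem.Str.startswith s "[")

-- the body of Source B after the list `ss` of stripped lines is built (early return "" = none arm)
def pvBBody (ss : List String) : String :=
  match (((PySem.List.enumerate ss).filter (fun p => pvIsCall p.2)).map (·.1)).head? with
  | none => ""
  | some start =>
    let stop := (((PySem.List.pyRange start (ss.length : Int) 1).filter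
        (fun i => PySem.List.pyGetD ss i "" == "")).head?).getD (ss.length : Int)
    PySem.Str.strip (PySem.Str.join "\n"
      ((PySem.List.slice ss (some start) (some stop)).filter pvIsCall))

def extract_crashlog_program_alt (raw : String) : String :=
  pvBBody ((PySem.Str.splitlines raw).map PySem.Str.strip)

-- ===== PRECONDITION & SPEC =====
def Spec_extract_crashlog_program (raw : String) (out : String) : Prop := out = extract_crashlog_program_alt raw
instance (raw : String) (out : String) : Decidable (Spec_extract_crashlog_program raw out) := by unfold Spec_extract_crashlog_program; infer_instance

-- ===== CLAIM (what is proved, stated in full; the proofs are below) =====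
def Claim_equal_extract_crashlog_program : Prop := ∀ (raw : String), Dom_extract_crashlog_program raw → Spec_extract_crashlog_program raw (extract_crashlog_program raw)

-- ===== LEMMAS AND PROOFS =====

-- the common spine both programs compute: the call-looking lines of the segment from the
-- first call-looking line up to the first empty (stripped) line after it
def pvSpine (ss : List String) : List String :=
  ((ss.dropWhile (fun s => !(pvIsCall s))).takeWhile (fun s => !(s == ""))).filter pvIsCall

-- A's loop without the accumulator
def pvG : List String → Bool → List String
  | [], _ => []
  | l :: t, inb =>
    let s := PySem.Str.strip l
    if pvIsCall s then s :: pvG t true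
    else if inb && s == "" then []
    else pvG t inb

-- A's `looks_like_call or looks_like_assignment` is just `looks_like_call`
lemma pvCond (s : String) :
    ((PySem.Str.isIn "(" s && PySem.Str.endswith s ")" && !(PySem.Str.startswith s "[")) ||
     (PySem.Str.startswith s "r" && PySem.Str.isIn "=" s &&
      (PySem.Str.isIn "(" s && PySem.Str.endswith s ")" && !(PySem.Str.startswith s "[")))) = pvIsCall s := by
  unfold pvIsCall
  cases PySem.Str.isIn "(" s <;> cases PySem.Str.endswith s ")" <;>
    cases PySem.Str.startswith s "[" <;> cases PySem.Str.startswith s "r" <;>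
    cases PySem.Str.isIn "=" s <;> rfl

lemma pvCall_ne_empty {s : String} (h : pvIsCall s = true) : (s == "") = false := by
  rcases eq_or_ne s "" with rfl | hne
  · exact absurd h (by decide)
  · simpa using hne

lemma pvALoop_acc (ls : List String) (acc : List String) (inb : Bool) :
    pvALoop ls acc inb = acc ++ pvG ls inb := by
  induction ls generalizing acc inb with
  | nil => simp [pvALoop, pvG]
  | cons l t ih =>
    simp only [pvALoop, pvG, pvCond (PySem.Str.strip l)]
    by_cases h : pvIsCall (PySem.Str.strip l) = true
    · simp [h, ih]
    · simp only [Bool.not_eq_true] at h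
      simp only [h]
      by_cases h2 : (inb && (PySem.Str.strip l == "")) = true
      · simp [h2]
      · simp only [Bool.not_eq_true] at h2
        simp [h2, ih]

lemma pvG_true (ls : List String) :
    pvG ls true = ((ls.map PySem.Str.strip).takeWhile (fun s => !(s == ""))).filter pvIsCall := by
  induction ls with
  | nil => simp [pvG]
  | cons l t ih =>
    simp only [pvG, List.map_cons, List.takeWhile_cons]
    by_cases h : pvIsCall (PySem.Str.strip l) = true
    · simp [h, pvCall_ne_empty h, ih]
    · simp only [Bool.not_eq_true] at h
      by_cases h2 : (PySem.Str.strip l == "") = true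
      · simp [h, h2]
      · simp only [Bool.not_eq_true] at h2
        simp [h, h2, ih]

lemma pvG_false (ls : List String) :
    pvG ls false = pvSpine (ls.map PySem.Str.strip) := by
  induction ls with
  | nil => simp [pvG, pvSpine]
  | cons l t ih =>
    simp only [pvG, pvSpine, List.map_cons, List.dropWhile_cons]
    by_cases h : pvIsCall (PySem.Str.strip l) = true
    · simp [h, pvCall_ne_empty h, pvG_true]
    · simp only [Bool.not_eq_true] at h
      simp [h, ih, pvSpine]

lemma pvEnumShift {α : Type} (t : List α) (k : Int) :
    PySem.List.enumerate t (k + 1) = (PySem.List.enumerate t k).map (fun p => (p.1 + 1, p.2)) := by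
  induction t generalizing k with
  | nil => simp [PySem.List.enumerate_nil]
  | cons x xs ih => simp [PySem.List.enumerate_cons, ih]

lemma pvRangeShift (a b : Int) :
    PySem.List.pyRange (a + 1) (b + 1) 1 = (PySem.List.pyRange a b 1).map (· + 1) := by
  rw [PySem.List.pyRange_one, PySem.List.pyRange_one]
  simp only [List.map_map]
  have h : b + 1 - (a + 1) = b - a := by ring
  rw [h]
  refine List.map_congr_left fun k _ => ?_
  simp; ring

lemma pvStartCons_true {s : String} (t : List String) (h : pvIsCall s = true) :
    (((PySem.List.enumerate (s :: t)).filter (fun p => pvIsCall p.2)).map (·.1)).head? = some 0 := by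
  simp [PySem.List.enumerate_cons, h]

lemma pvStartCons_false {s : String} (t : List String) (h : pvIsCall s = false) :
    (((PySem.List.enumerate (s :: t)).filter (fun p => pvIsCall p.2)).map (·.1)).head? =
      ((((PySem.List.enumerate t).filter (fun p => pvIsCall p.2)).map (·.1)).head?).map (· + 1) := by
  simp only [PySem.List.enumerate_cons, List.filter_cons, h, Bool.false_eq_true, if_false]
  have he := pvEnumShift t 0
  norm_num at he ⊢
  rw [he, List.find?_map]
  simp [Function.comp_def]

lemma pvStartNonneg {t : List String} {a : Int}
    (h : (((PySem.List.enumerate t).filter (fun p => pvIsCall p.2)).map (·.1)).head? = some a) :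
    0 ≤ a := by
  have hm : a ∈ ((PySem.List.enumerate t).filter (fun p => pvIsCall p.2)).map (·.1) :=
    List.mem_of_mem_head? h
  obtain ⟨p, hp, rfl⟩ := List.mem_map.1 hm
  have hpe : p ∈ PySem.List.enumerate t := List.mem_of_mem_filter hp
  have hmm : p.1 ∈ (PySem.List.enumerate t).map (·.1) := List.mem_map.2 ⟨p, hpe, rfl⟩
  rw [PySem.List.map_fst_enumerate] at hmm
  have := (PySem.List.mem_pyRange_one.1 hmm).1
  omega

-- the `stop` expression of pvBBody as a function
def pvStop (ss : List String) (a : Int) : Int :=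
  (((PySem.List.pyRange a (ss.length : Int) 1).filter
      (fun i => PySem.List.pyGetD ss i "" == "")).head?).getD (ss.length : Int)

lemma pvGetDShift (s : String) (t : List String) {i : Int} (h0 : 0 ≤ i) (h1 : i < t.length) :
    PySem.List.pyGetD (s :: t) (i + 1) "" = PySem.List.pyGetD t i "" := by
  rw [PySem.List.pyGetD_eq_getElem (s :: t) "" (by omega) (by simp; omega),
      PySem.List.pyGetD_eq_getElem t "" h0 (by simpa using h1)]
  have h2 : (i + 1).toNat = i.toNat + 1 := by omega
  simp [h2]

lemma pvStopShift (s : String) (t : List String) (a : Int) (ha : 0 ≤ a) :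
    pvStop (s :: t) (a + 1) = pvStop t a + 1 := by
  unfold pvStop
  have hlen : ((s :: t).length : Int) = (t.length : Int) + 1 := by simp
  rw [hlen, pvRangeShift, List.filter_map]
  have hcg : ∀ i ∈ PySem.List.pyRange a (t.length : Int) 1,
      ((fun i => PySem.List.pyGetD (s :: t) i "" == "") ∘ (· + 1)) i
        = (PySem.List.pyGetD t i "" == "") := by
    intro i hi
    have := PySem.List.mem_pyRange_one.1 hi
    simp only [Function.comp_apply]
    rw [pvGetDShift s t (by omega) (by omega)]
  rw [List.filter_congr hcg, List.head?_map]
  cases h : (List.filter (fun i => PySem.List.pyGetD t i "" == "")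
      (PySem.List.pyRange a (t.length : Int) 1)).head? <;> simp

lemma pvStopNonneg (ss : List String) (a : Int) (ha : 0 ≤ a) : 0 ≤ pvStop ss a := by
  unfold pvStop
  cases h : (List.filter (fun i => PySem.List.pyGetD ss i "" == "")
      (PySem.List.pyRange a (ss.length : Int) 1)).head? with
  | none => simp
  | some i =>
    have hm : i ∈ _ := List.mem_of_mem_head? h
    have := PySem.List.mem_pyRange_one.1 (List.mem_of_mem_filter hm)
    simp only [Option.getD_some]; omega

lemma pvSliceShift (s : String) (t : List String) (a b : Int) (ha : 0 ≤ a) (hb : 0 ≤ b) :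
    PySem.List.slice (s :: t) (some (a + 1)) (some (b + 1)) = PySem.List.slice t (some a) (some b) := by
  rw [PySem.List.slice_toNat _ (by omega) (by omega), PySem.List.slice_toNat _ ha hb]
  have h1 : (a + 1).toNat = a.toNat + 1 := by omega
  simp only [h1, List.drop_succ_cons]
  congr 1
  omega

lemma pvTakeFirst (ss : List String) :
    PySem.List.slice ss (some 0) (some (pvStop ss 0)) = ss.takeWhile (fun s => !(s == "")) := by
  induction ss with
  | nil => simp [PySem.List.slice]
  | cons s t ih =>
    have hr : PySem.List.pyRange 0 ((s :: t).length : Int) 1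
        = 0 :: PySem.List.pyRange 1 ((s :: t).length : Int) 1 := by
      rw [PySem.List.pyRange_one_cons (by simp)]
      norm_num
    by_cases he : (s == "") = true
    · have he' : s = "" := by simpa using he
      have hstop : pvStop (s :: t) 0 = 0 := by
        unfold pvStop
        rw [hr, List.filter_cons]
        simp [PySem.List.pyGetD_zero_cons, he']
      rw [hstop, PySem.List.slice_toNat _ le_rfl le_rfl]
      simp [he]
    · have he' : s ≠ "" := by simpa using he
      have hstop : pvStop (s :: t) 0 = pvStop t 0 + 1 := by
        have h01 : (0 : Int) + 1 = 1 := by ring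
        have hsh := pvStopShift s t 0 le_rfl
        rw [h01] at hsh
        rw [← hsh]
        unfold pvStop
        rw [hr, List.filter_cons]
        simp [PySem.List.pyGetD_zero_cons, he']
      rw [hstop]
      have hst := pvStopNonneg t 0 le_rfl
      rw [PySem.List.slice_toNat _ (by omega) (by omega)]
      have h1 : (pvStop t 0 + 1).toNat = (pvStop t 0).toNat + 1 := by omega
      simp only [h1]
      rw [List.takeWhile_cons]
      simp only [he, Bool.not_false, if_true]
      rw [← ih, PySem.List.slice_toNat _ le_rfl hst]
      simp

lemma pvSpineCons {s : String} (t : List String) (h : pvIsCall s = false) :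
    pvSpine (s :: t) = pvSpine t := by
  unfold pvSpine
  rw [List.dropWhile_cons]
  simp [h]

lemma pvBBody_eq (ss : List String) :
    pvBBody ss = PySem.Str.strip (PySem.Str.join "\n" (pvSpine ss)) := by
  induction ss with
  | nil => decide
  | cons s t ih =>
    by_cases hc : pvIsCall s = true
    · unfold pvBBody
      rw [pvStartCons_true t hc]
      show PySem.Str.strip (PySem.Str.join "\n"
        ((PySem.List.slice (s :: t) (some 0) (some (pvStop (s :: t) 0))).filter pvIsCall)) = _
      rw [pvTakeFirst]
      unfold pvSpine
      rw [List.dropWhile_cons]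
      simp [hc]
    · have hc' : pvIsCall s = false := by simpa using hc
      rw [pvSpineCons t hc', ← ih]
      unfold pvBBody
      rw [pvStartCons_false t hc']
      cases h : (((PySem.List.enumerate t).filter (fun p => pvIsCall p.2)).map (·.1)).head? with
      | none => rfl
      | some a =>
        have ha := pvStartNonneg h
        simp only [Option.map_some]
        show PySem.Str.strip (PySem.Str.join "\n"
            ((PySem.List.slice (s :: t) (some (a + 1)) (some (pvStop (s :: t) (a + 1)))).filter pvIsCall))
          = PySem.Str.strip (PySem.Str.join "\n"
            ((PySem.List.slice t (some a) (some (pvStop t a))).filter pvIsCall))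
        rw [pvStopShift s t a ha, pvSliceShift s t a _ ha (pvStopNonneg t a ha)]

-- ===== VERDICT (by name: the statement is the Claim_ definition above) =====
theorem extract_crashlog_program_spec : Claim_equal_extract_crashlog_program := by
  intro raw _
  show _ = _
  rw [extract_crashlog_program, extract_crashlog_program_alt, pvALoop_acc, pvG_false, pvBBody_eq]
  rfl
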